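-- pv_equiv track=rewrite | github.com/randti/xperiments | a10/3.py | viruslog
-- ===== SOURCE A (Python) =====
-- def viruslog(p):
--     c=0
--     for j in range(len(p)-1):
--         for i in range(j,len(p)-1):
--             a=p[j:i+1]
--             a=a*3
--             if p.count(a)!=0:
--                 c=1
--                 break
--     if c==1:
--         return True
--     else:
--         return False
-- ===== SOURCE B (Python) =====
-- def viruslog(p):
--     n = len(p)
--     for L in range(1, n // 3 + 1):
--         run = 0
--         for i in range(n - L):
--             if p[i] == p[i + L]:
--                 run += 1
--                 if run >= 2 * L:
--                     return True
--             else: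
--                 run = 0
--     return False
-- ===== Notes on version B (the rewrite author's own statement) =====
-- stated objective: faster
-- what changed: Instead of tripling every substring and searching for it with str.count (O(n^4)), B scans, for each candidate period L up to n//3, the match array p[i]==p[i+L] for a run of length 2L, which witnesses a cube of period L (O(n^2)).
import Mathlib
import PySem

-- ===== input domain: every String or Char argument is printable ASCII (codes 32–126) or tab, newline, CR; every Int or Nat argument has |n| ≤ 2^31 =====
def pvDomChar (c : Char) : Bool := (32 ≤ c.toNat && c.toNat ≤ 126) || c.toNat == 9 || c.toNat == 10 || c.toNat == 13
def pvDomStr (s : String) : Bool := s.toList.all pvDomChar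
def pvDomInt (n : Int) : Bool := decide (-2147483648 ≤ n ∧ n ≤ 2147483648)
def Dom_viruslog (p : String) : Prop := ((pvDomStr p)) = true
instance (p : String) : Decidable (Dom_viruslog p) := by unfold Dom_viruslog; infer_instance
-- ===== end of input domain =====

-- B detects a cube substring by scanning, for each period L ≤ n//3, the match array
-- p[i]==p[i+L] for a run of length 2L — O(n^2) instead of A's triple-and-count O(n^4).

-- ===== PORT A =====
-- inner 'for i in range(j, len(p)-1)' with its break: first hit returns c = 1
def virusInner (l : List Char) (j : Int) : List Int → Int → Int
  | [], c => c
  | i :: rest, c =>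
    if PySem.Chars.count l (PySem.List.pyRepeat (PySem.List.slice l (some j) (some (i+1))) 3) ≠ 0
      then 1
      else virusInner l j rest c

def viruslog (p : String) : Bool :=
  let l := p.toList
  let n : Int := PySem.List.len l
  let c : Int := (PySem.List.pyRange 0 (n-1) 1).foldl
    (fun c j => virusInner l j (PySem.List.pyRange j (n-1) 1) c) 0
  if c == 1 then true else false

-- ===== PORT B =====
-- inner 'for i in range(n-L)' with the running streak counter and early 'return True'
def altInner (l : List Char) (L : Int) : List Int → Int → Bool
  | [], _ => false
  | i :: rest, run =>
    if PySem.List.pyGet? l i == PySem.List.pyGet? l (i + L) then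
      if run + 1 ≥ 2*L then true else altInner l L rest (run + 1)
    else altInner l L rest 0

-- outer 'for L in range(1, n//3+1)' with the early 'return True'
def altOuter (l : List Char) (n : Int) : List Int → Bool
  | [] => false
  | L :: rest =>
    if altInner l L (PySem.List.pyRange 0 (n - L) 1) 0 then true else altOuter l n rest

def viruslog_alt (p : String) : Bool :=
  let l := p.toList
  let n : Int := PySem.List.len l
  altOuter l n (PySem.List.pyRange 1 (PySem.Int.floordiv n 3 + 1) 1)

-- ===== PRECONDITION & SPEC =====
def Spec_viruslog (p : String) (out : Bool) : Prop := out = viruslog_alt p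
instance (p : String) (out : Bool) : Decidable (Spec_viruslog p out) := by unfold Spec_viruslog; infer_instance

-- ===== CLAIM (what is proved, stated in full; the proofs are below) =====
def Claim_equal_viruslog : Prop := ∀ (p : String), Dom_viruslog p → Spec_viruslog p (viruslog p)

-- ===== LEMMAS AND PROOFS =====

-- the common specification: l contains a cube w++w++w with w nonempty
def HasCube (l : List Char) : Prop := ∃ w : List Char, w ≠ [] ∧ (w ++ w ++ w) <:+: l

-- positions k and k+L hold the same character (Python p[i] == p[i+L])
def MatchI (l : List Char) (L k : Int) : Prop := PySem.List.pyGet? l k = PySem.List.pyGet? l (k+L)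

-- ---- str.count: nonzero iff the (nonempty) pattern is an infix ----
lemma count_go_ge (sub l : List Char) (fuel acc : Nat) : acc ≤ PySem.Chars.count.go sub fuel l acc := by
  induction fuel generalizing l acc with
  | zero => simp [PySem.Chars.count.go]
  | succ fuel ih =>
    cases l with
    | nil => simp [PySem.Chars.count.go]
    | cons h t =>
      rw [PySem.Chars.count.go]
      split
      · exact le_trans (Nat.le_succ acc) (ih _ _)
      · exact ih _ _

lemma count_go_eq_iff (sub : List Char) (hsub : sub ≠ []) (l : List Char) (fuel acc : Nat)
    (hf : l.length ≤ fuel) : PySem.Chars.count.go sub fuel l acc = acc ↔ ¬ sub <:+: l := by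
  induction fuel generalizing l acc with
  | zero =>
    have : l = [] := List.eq_nil_of_length_eq_zero (Nat.le_zero.mp hf)
    subst this
    simp [PySem.Chars.count.go, hsub]
  | succ fuel ih =>
    cases l with
    | nil => simp [PySem.Chars.count.go, hsub]
    | cons h t =>
      rw [PySem.Chars.count.go]
      split
      · rename_i hpre
        constructor
        · intro heq
          have := count_go_ge sub (List.drop sub.length (h :: t)) fuel (acc+1)
          omega
        · intro hninf
          exact absurd (List.IsPrefix.isInfix (List.isPrefixOf_iff_prefix.mp hpre)) hninf
      · rename_i hpre
        have ht : t.length ≤ fuel := by simp at hf; omega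
        rw [ih t acc ht, List.infix_cons_iff]
        have : ¬ sub <+: (h :: t) := fun hp => hpre (List.isPrefixOf_iff_prefix.mpr hp)
        tauto

lemma count_ne_zero_iff (l sub : List Char) (hsub : sub ≠ []) :
    PySem.Chars.count l sub ≠ 0 ↔ sub <:+: l := by
  have : ¬ sub.isEmpty = true := by simp [hsub]
  rw [PySem.Chars.count]
  have he : sub.isEmpty = false := by cases sub <;> simp_all
  simp only [he, Bool.false_eq_true, if_false]
  rw [ne_eq, count_go_eq_iff sub hsub l l.length 0 le_rfl]
  tauto

-- ---- characterisation of A ----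
def HitA (l : List Char) (j i : Int) : Prop :=
  PySem.Chars.count l (PySem.List.pyRepeat (PySem.List.slice l (some j) (some (i+1))) 3) ≠ 0

lemma virusInner_eq_one_iff (l : List Char) (j : Int) (is : List Int) (c : Int) :
    virusInner l j is c = 1 ↔ c = 1 ∨ ∃ i ∈ is, HitA l j i := by
  induction is generalizing c with
  | nil => simp [virusInner]
  | cons i rest ih =>
    rw [virusInner]
    split
    · rename_i hhit
      simp only [List.mem_cons]
      constructor
      · intro _; exact Or.inr ⟨i, Or.inl rfl, hhit⟩
      · intro _; trivial
    · rename_i hhit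
      rw [ih c]
      simp only [List.mem_cons]
      constructor
      · rintro (h | ⟨i', hi', hh⟩)
        · exact Or.inl h
        · exact Or.inr ⟨i', Or.inr hi', hh⟩
      · rintro (h | ⟨i', (rfl | hi'), hh⟩)
        · exact Or.inl h
        · exact absurd hh hhit
        · exact Or.inr ⟨i', hi', hh⟩

lemma foldlA_eq_one_iff (l : List Char) (n : Int) (js : List Int) (c : Int) :
    (js.foldl (fun c j => virusInner l j (PySem.List.pyRange j (n-1) 1) c) c = 1) ↔
      c = 1 ∨ ∃ j ∈ js, ∃ i ∈ PySem.List.pyRange j (n-1) 1, HitA l j i := by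
  induction js generalizing c with
  | nil => simp
  | cons j rest ih =>
    rw [List.foldl_cons, ih]
    rw [virusInner_eq_one_iff]
    simp only [List.mem_cons]
    constructor
    · rintro ((h | h) | ⟨j', hj', hh⟩)
      · exact Or.inl h
      · exact Or.inr ⟨j, Or.inl rfl, h⟩
      · exact Or.inr ⟨j', Or.inr hj', hh⟩
    · rintro (h | ⟨j', (rfl | hj'), hh⟩)
      · exact Or.inl (Or.inl h)
      · exact Or.inl (Or.inr hh)
      · exact Or.inr ⟨j', hj', hh⟩

lemma pyRepeat_three (w : List Char) : PySem.List.pyRepeat w 3 = w ++ w ++ w := by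
  simp [PySem.List.pyRepeat]

lemma A_iff (p : String) : viruslog p = true ↔ HasCube p.toList := by
  set l := p.toList with hl
  show (if ((PySem.List.pyRange 0 (PySem.List.len l - 1) 1).foldl
      (fun c j => virusInner l j (PySem.List.pyRange j (PySem.List.len l - 1) 1) c) 0) == 1
      then true else false) = true ↔ HasCube l
  rw [show (PySem.List.len l - 1) = ((l.length : Int) - 1) by simp [PySem.List.len_eq]]
  split
  · rename_i hc
    simp only [beq_iff_eq] at hc
    rw [foldlA_eq_one_iff] at hc
    simp only [true_iff]
    rcases hc with h | ⟨j, hj, i, hi, hhit⟩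
    · omega
    · rw [PySem.List.mem_pyRange_one] at hj hi
      unfold HitA at hhit
      rw [pyRepeat_three] at hhit
      have hw' : PySem.List.slice l (some j) (some (i+1)) =
          (l.drop j.toNat).take ((i+1).toNat - j.toNat) :=
        PySem.List.slice_toNat l (by omega) (by omega)
      have hwne : PySem.List.slice l (some j) (some (i+1)) ≠ [] := by
        rw [hw']
        intro hnil
        have := congrArg List.length hnil
        simp at this
        omega
      rw [count_ne_zero_iff l _ (by simp [hwne])] at hhit
      exact ⟨_, hwne, hhit⟩
  · rename_i hc
    simp only [beq_iff_eq] at hc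
    rw [foldlA_eq_one_iff] at hc
    simp only [Bool.false_eq_true, false_iff]
    rintro ⟨w, hwne, u, v, huv⟩
    apply hc
    right
    have hlen : l.length = u.length + (w.length + w.length + w.length) + v.length := by
      rw [← huv]; simp; omega
    have hwpos : 0 < w.length := List.length_pos_iff.mpr hwne
    refine ⟨(u.length : Int), ?_, (u.length : Int) + w.length - 1, ?_, ?_⟩
    · rw [PySem.List.mem_pyRange_one]
      constructor
      · omega
      · omega
    · rw [PySem.List.mem_pyRange_one]
      constructor
      · omega
      · omega
    · unfold HitA
      have harg : (PySem.List.slice l (some (u.length : Int))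
          (some ((u.length : Int) + (w.length : Int) - 1 + 1))) = w := by
        rw [show ((u.length : Int) + (w.length : Int) - 1 + 1) = ((u.length : Int) + (w.length : Int)) by ring]
        rw [PySem.List.slice_natCast_add]
        rw [← huv, List.append_assoc u, List.drop_left]
        rw [show (w ++ w ++ w) ++ v = w ++ (w ++ w ++ v) by simp]
        exact List.take_left
      rw [harg, pyRepeat_three]
      rw [count_ne_zero_iff l _ (by simp [hwne])]
      exact ⟨u, v, huv⟩

-- ---- characterisation of B ----
lemma pyRange_one_nil (a b : Int) (h : b ≤ a) : PySem.List.pyRange a b 1 = [] := by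
  simp [PySem.List.pyRange]; omega

lemma altInner_sound (l : List Char) (L : Int) (b : Int) : ∀ (m : Nat) (a r : Int), (b - a).toNat = m →
    0 ≤ r →
    (∀ k, a - r ≤ k → k < a → MatchI l L k) →
    altInner l L (PySem.List.pyRange a b 1) r = true →
      ∃ s, a - r ≤ s ∧ s + 2*L ≤ b ∧ ∀ k, s ≤ k → k < s + 2*L → MatchI l L k := by
  intro m
  induction m with
  | zero =>
    intro a r hm hr hstreak htrue
    rw [pyRange_one_nil a b (by omega)] at htrue
    simp [altInner] at htrue
  | succ m ih =>
    intro a r hm hr hstreak htrue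
    have hab : a < b := by omega
    rw [PySem.List.pyRange_one_cons hab] at htrue
    rw [altInner] at htrue
    split at htrue
    · rename_i hmatch
      rw [beq_iff_eq] at hmatch
      split at htrue
      · rename_i hrun
        refine ⟨a + 1 - 2*L, by omega, by omega, ?_⟩
        intro k hk1 hk2
        rcases lt_or_ge k a with hka | hka
        · exact hstreak k (by omega) hka
        · have : k = a := by omega
          subst this; exact hmatch
      · rename_i hrun
        have hstreak' : ∀ k, (a+1) - (r+1) ≤ k → k < a+1 → MatchI l L k := by
          intro k hk1 hk2
          rcases lt_or_ge k a with hka | hka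
          · exact hstreak k (by omega) hka
          · have : k = a := by omega
            subst this; exact hmatch
        obtain ⟨s, hs1, hs2, hs3⟩ := ih (a+1) (r+1) (by omega) (by omega) hstreak' htrue
        exact ⟨s, by omega, hs2, hs3⟩
    · rename_i hmatch
      obtain ⟨s, hs1, hs2, hs3⟩ := ih (a+1) 0 (by omega) le_rfl (by omega) htrue
      exact ⟨s, by omega, hs2, hs3⟩

lemma altInner_complete (l : List Char) (L : Int) (b : Int) : ∀ (m : Nat) (a r : Int), (b - a).toNat = m →
    0 ≤ r → r < 2*L →
    (∀ s, a - r ≤ s → s + 2*L ≤ b → (∀ k, s ≤ k → k < s + 2*L → MatchI l L k) →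
      altInner l L (PySem.List.pyRange a b 1) r = true) := by
  intro m
  induction m with
  | zero =>
    intro a r hm hr hr2 s hs hsb hwin
    omega
  | succ m ih =>
    intro a r hm hr hr2 s hs hsb hwin
    have hab : a < b := by omega
    rw [PySem.List.pyRange_one_cons hab, altInner]
    by_cases hma : MatchI l L a
    · rw [show (PySem.List.pyGet? l a == PySem.List.pyGet? l (a + L)) = true by
        rw [beq_iff_eq]; exact hma]
      simp only [if_true]
      split
      · rfl
      · rename_i hrun
        exact ih (a+1) (r+1) (by omega) (by omega) (by omega) s (by omega) hsb hwin
    · rw [show (PySem.List.pyGet? l a == PySem.List.pyGet? l (a + L)) = false by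
        rw [beq_eq_false_iff_ne]; exact hma]
      simp only [Bool.false_eq_true, if_false]
      -- a is not in the window, and a ≥ s+2L is impossible since r < 2L
      have hna : a < s ∨ a ≥ s + 2*L := by
        by_contra hcon
        push Not at hcon
        exact hma (hwin a hcon.1 hcon.2)
      have hlt : a < s := by omega
      exact ih (a+1) 0 (by omega) le_rfl (by omega) s (by omega) hsb hwin

lemma altOuter_true_iff (l : List Char) (n : Int) (Ls : List Int) :
    altOuter l n Ls = true ↔ ∃ L ∈ Ls, altInner l L (PySem.List.pyRange 0 (n - L) 1) 0 = true := by
  induction Ls with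
  | nil => simp [altOuter]
  | cons L rest ih =>
    rw [altOuter]
    split
    · rename_i h
      simp only [List.mem_cons, true_iff]
      exact ⟨L, Or.inl rfl, h⟩
    · rename_i h
      rw [ih]
      simp only [List.mem_cons]
      constructor
      · rintro ⟨L', hL', ht⟩; exact ⟨L', Or.inr hL', ht⟩
      · rintro ⟨L', (rfl | hL'), ht⟩
        · exact absurd ht h
        · exact ⟨L', hL', ht⟩

lemma B_iff (p : String) : viruslog_alt p = true ↔
    ∃ L s : Int, 1 ≤ L ∧ 0 ≤ s ∧ s + 3*L ≤ (p.toList.length : Int) ∧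
      ∀ k, s ≤ k → k < s + 2*L → MatchI p.toList L k := by
  set l := p.toList with hl
  show altOuter l (PySem.List.len l) (PySem.List.pyRange 1 (PySem.Int.floordiv (PySem.List.len l) 3 + 1) 1) = true ↔ _
  rw [show PySem.List.len l = (l.length : Int) by simp [PySem.List.len_eq]]
  rw [altOuter_true_iff]
  constructor
  · rintro ⟨L, hL, ht⟩
    rw [PySem.List.mem_pyRange_one] at hL
    have h3 : L * 3 ≤ (l.length : Int) := by
      have := (PySem.Int.le_floordiv_iff_mul_le (by norm_num : (0:Int) < 3)).mp (by omega : L ≤ PySem.Int.floordiv (l.length : Int) 3)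
      exact this
    obtain ⟨s, hs1, hs2, hs3⟩ := altInner_sound l L ((l.length : Int) - L)
      (((l.length : Int) - L) - 0).toNat 0 0 rfl le_rfl (by omega) ht
    exact ⟨L, s, by omega, by omega, by omega, hs3⟩
  · rintro ⟨L, s, hL, hs, hsn, hwin⟩
    refine ⟨L, ?_, ?_⟩
    · rw [PySem.List.mem_pyRange_one]
      refine ⟨hL, ?_⟩
      have : L ≤ PySem.Int.floordiv (l.length : Int) 3 :=
        (PySem.Int.le_floordiv_iff_mul_le (by norm_num : (0:Int) < 3)).mpr (by omega)
      omega
    · exact altInner_complete l L ((l.length : Int) - L)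
        (((l.length : Int) - L) - 0).toNat 0 0 rfl le_rfl (by omega) s (by omega) (by omega) hwin

-- ---- window of 2L matches at distance L  ↔  cube ----
lemma mod_case2 (d L : Nat) (h1 : L ≤ d) (h2 : d < 2*L) : d % L = d - L := by
  rw [Nat.mod_eq_sub_mod h1, Nat.mod_eq_of_lt (by omega)]

lemma mod_case3 (d L : Nat) (h1 : 2*L ≤ d) (h2 : d < 3*L) : d % L = d - 2*L := by
  rw [Nat.mod_eq_sub_mod (by omega), Nat.mod_eq_sub_mod (by omega), Nat.mod_eq_of_lt (by omega)]
  omega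

-- the three segments of w ++ w ++ w, by index

lemma cube_getElem? (w : List Char) (d : Nat) (hd : d < 3 * w.length) :
    (w ++ w ++ w)[d]? = w[d % w.length]? := by
  have hL : 0 < w.length := by omega
  rcases Nat.lt_or_ge d w.length with h1 | h1
  · rw [List.getElem?_append_left (by simp; omega), List.getElem?_append_left h1,
      Nat.mod_eq_of_lt h1]
  · rcases Nat.lt_or_ge d (2 * w.length) with h2 | h2
    · rw [List.getElem?_append_left (by simp; omega),
        List.getElem?_append_right h1, mod_case2 d w.length h1 h2]
    · rw [List.getElem?_append_right (by simp; omega)]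
      simp only [List.length_append]
      rw [mod_case3 d w.length h2 hd, show d - (w.length + w.length) = d - 2*w.length by omega]

lemma cube_of_win (l : List Char) (L s : Nat) (hL : 0 < L) (hs : s + 3*L ≤ l.length)
    (h : ∀ k, k < 2*L → l[s+k]? = l[s+k+L]?) : HasCube l := by
  set w := (l.drop s).take L with hw
  have hwlen : w.length = L := by rw [hw]; simp; omega
  have hwne : w ≠ [] := by
    intro hnil; rw [hnil] at hwlen; simp at hwlen; omega
  have hstep : ∀ d, L ≤ d → d < 3*L → l[s+d]? = l[s+(d-L)]? := by
    intro d h1 h2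
    have := h (d - L) (by omega)
    rw [show s + (d - L) + L = s + d by omega] at this
    exact this.symm
  have heq : w ++ w ++ w = (l.drop s).take (3*L) := by
    apply List.ext_getElem?
    intro d
    rcases Nat.lt_or_ge d (3*L) with hd | hd
    · rw [cube_getElem? w d (by omega), List.getElem?_take_of_lt hd, List.getElem?_drop, hwlen]
      have hmod : d % L < L := Nat.mod_lt _ hL
      have hrhs : w[d % L]? = l[s + d % L]? := by
        rw [hw, List.getElem?_take_of_lt hmod, List.getElem?_drop]
      rw [hrhs]
      rcases Nat.lt_or_ge d L with h1 | h1
      · rw [Nat.mod_eq_of_lt h1]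
      · rcases Nat.lt_or_ge d (2*L) with h2 | h2
        · rw [hstep d h1 (by omega), mod_case2 d L h1 h2]
        · rw [hstep d (by omega) hd, hstep (d-L) (by omega) (by omega),
            mod_case3 d L h2 hd, show d - L - L = d - 2*L by omega]
    · rw [List.getElem?_eq_none (by simp [hwlen]; omega),
        List.getElem?_eq_none (by simp; omega)]
  refine ⟨w, hwne, l.take s, (l.drop s).drop (3*L), ?_⟩
  rw [heq, List.append_assoc, List.take_append_drop, List.take_append_drop]

lemma win_of_cube (l : List Char) (hcube : HasCube l) :
    ∃ L s : Nat, 0 < L ∧ s + 3*L ≤ l.length ∧ ∀ k, k < 2*L → l[s+k]? = l[s+k+L]? := by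
  obtain ⟨w, hwne, u, v, huv⟩ := hcube
  have hwpos : 0 < w.length := List.length_pos_iff.mpr hwne
  have hlen : l.length = u.length + (w.length + w.length + w.length) + v.length := by
    rw [← huv]; simp; omega
  refine ⟨w.length, u.length, hwpos, by omega, ?_⟩
  intro k hk
  have hcast : ∀ d, d < 3 * w.length → l[u.length + d]? = w[d % w.length]? := by
    intro d hd
    rw [← huv, List.append_assoc]
    rw [List.getElem?_append_right (by omega)]
    rw [show u.length + d - u.length = d by omega]
    rw [List.getElem?_append_left (by simp; omega)]
    exact cube_getElem? w d hd
  rw [hcast k (by omega), show u.length + k + w.length = u.length + (k + w.length) by omega,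
    hcast (k + w.length) (by omega)]
  congr 1
  rw [Nat.mod_eq_sub_mod (by omega : w.length ≤ k + w.length)]
  simp

lemma win_int_iff_cube (l : List Char) :
    (∃ L s : Int, 1 ≤ L ∧ 0 ≤ s ∧ s + 3*L ≤ (l.length : Int) ∧
        ∀ k, s ≤ k → k < s + 2*L → MatchI l L k) ↔ HasCube l := by
  constructor
  · rintro ⟨L, s, hL, hs, hsn, hwin⟩
    apply cube_of_win l L.toNat s.toNat (by omega) (by omega)
    intro k hk
    have hm := hwin (s + (k : Int)) (by omega) (by omega)
    unfold MatchI at hm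
    rw [show s + (k : Int) = ((s.toNat + k : Nat) : Int) by push_cast; omega] at hm
    rw [show ((s.toNat + k : Nat) : Int) + L = ((s.toNat + k + L.toNat : Nat) : Int) by push_cast; omega] at hm
    rw [PySem.List.pyGet?_natCast, PySem.List.pyGet?_natCast] at hm
    exact hm
  · intro hcube
    obtain ⟨L, s, hL, hsn, hwin⟩ := win_of_cube l hcube
    refine ⟨(L : Int), (s : Int), by omega, by omega, by omega, ?_⟩
    intro k hk1 hk2
    have hk0 : 0 ≤ k := by omega
    have h := hwin (k.toNat - s) (by omega)
    rw [show s + (k.toNat - s) = k.toNat by omega] at h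
    unfold MatchI
    rw [show k = ((k.toNat : Nat) : Int) by omega,
      show ((k.toNat : Nat) : Int) + L = ((k.toNat + L : Nat) : Int) by push_cast; omega,
      PySem.List.pyGet?_natCast, PySem.List.pyGet?_natCast]
    exact h

-- ===== VERDICT (by name: the statement is the Claim_ definition above) =====
theorem viruslog_spec : Claim_equal_viruslog := by
  intro p _
  unfold Spec_viruslog
  have : viruslog p = true ↔ viruslog_alt p = true := by
    rw [A_iff, B_iff, win_int_iff_cube]
  cases hA : viruslog p <;> cases hB : viruslog_alt p <;> simp_all
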